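-- pv_equiv track=rewrite | github.com/MoNireu/Algorithm | heap/programmers/42626.py | solution
-- ===== SOURCE A (Python) =====
-- import heapq
--
-- def solution(scovilles, K):
--     answer = 0
--     heapq.heapify(scovilles)
--     while(len(scovilles) > 1):
--         first = heapq.heappop(scovilles)
--
--         if first >= K:
--             break
--
--         second = heapq.heappop(scovilles)
--
--         new = first + (second * 2)
--         heapq.heappush(scovilles, new)
--         answer += 1
--
--
--     if scovilles[0] >= K:
--         return answer
--     else:
--         return -1
-- ===== SOURCE B (Python) =====
-- def _insort(s, x):
--     lo, hi = 0, len(s)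
--     while lo < hi:
--         mid = (lo + hi) // 2
--         if s[mid] < x:
--             lo = mid + 1
--         else:
--             hi = mid
--     s.insert(lo, x)
--
--
-- def solution(scovilles, K):
--     s = sorted(scovilles)
--     answer = 0
--     while len(s) > 1:
--         if s[0] >= K:
--             break
--         first = s.pop(0)
--         second = s.pop(0)
--         _insort(s, first + second * 2)
--         answer += 1
--     if s[0] >= K:
--         return answer
--     return -1
-- ===== Notes on version B (the rewrite author's own statement) =====
-- stated objective: alternative
-- what changed: Replaces heapq's implicit binary heap (heapify/heappop/heappush with sift operations) by a sorted list maintained with a hand-written binary-search insertion: sort once, then repeatedly take the two head elements and re-insert the mix at its binary-search position.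
import Mathlib
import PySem

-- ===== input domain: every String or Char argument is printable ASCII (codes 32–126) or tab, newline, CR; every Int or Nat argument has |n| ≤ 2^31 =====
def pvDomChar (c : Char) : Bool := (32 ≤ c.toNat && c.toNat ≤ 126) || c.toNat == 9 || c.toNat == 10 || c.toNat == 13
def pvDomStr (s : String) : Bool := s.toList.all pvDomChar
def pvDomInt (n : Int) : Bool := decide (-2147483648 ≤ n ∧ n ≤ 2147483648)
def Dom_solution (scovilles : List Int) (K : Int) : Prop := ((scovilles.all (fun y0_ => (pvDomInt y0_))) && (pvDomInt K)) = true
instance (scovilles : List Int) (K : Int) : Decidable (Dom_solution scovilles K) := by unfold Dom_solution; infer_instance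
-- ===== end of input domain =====

-- B replaces A's heapq binary heap with a sorted list maintained by binary-search insertion (alternative
-- data structure, similar cost); equivalence is about the RETURN value only — A heapifies the caller's
-- list in place, B leaves it untouched (it sorts a copy).

-- ===== PORT A =====
-- CPython heapq._siftdown(heap, startpos, pos); `newitem` is the value heap[pos] holds at entry.
def siftdownAux (heap : List Int) (startpos pos : Nat) (newitem : Int) : List Int :=
  if _h : startpos < pos then
    let parentpos := (pos - 1) / 2
    let parent := heap.getD parentpos 0
    if newitem < parent then
      siftdownAux (heap.set pos parent) startpos parentpos newitem
    else heap.set pos newitem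
  else heap.set pos newitem
termination_by pos
decreasing_by omega

-- CPython heapq._siftup(heap, pos): descend to a leaf following the smaller child, then the final
-- `heap[pos] = newitem; _siftdown(heap, startpos, pos)` is the call of siftdownAux in the base case.
def siftupAux (heap : List Int) (startpos pos : Nat) (newitem : Int) : List Int :=
  let endpos := heap.length
  let childpos := 2 * pos + 1
  if _h : childpos < endpos then
    let childpos := if childpos + 1 < endpos ∧ ¬ (heap.getD childpos 0 < heap.getD (childpos + 1) 0)
      then childpos + 1 else childpos
    siftupAux (heap.set pos (heap.getD childpos 0)) startpos childpos newitem
  else siftdownAux (heap.set pos newitem) startpos pos newitem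
termination_by heap.length - pos
decreasing_by simp_all; split <;> omega

-- heapq.heappush(heap, item): heap.append(item); _siftdown(heap, 0, len(heap)-1)
def heappushA (heap : List Int) (item : Int) : List Int :=
  siftdownAux (heap ++ [item]) 0 heap.length item

-- heapq.heappop(heap): lastelt = heap.pop(); if heap: return heap[0] after heap[0]=lastelt; _siftup(heap,0)
-- (heappop of an empty list raises in Python; that state is unreachable under the loop guards)
def heappopA (heap : List Int) : Int × List Int :=
  let lastelt := heap.getD (heap.length - 1) 0
  let rest := heap.dropLast
  if rest.isEmpty then (lastelt, rest)
  else (rest.getD 0 0, siftupAux (rest.set 0 lastelt) 0 0 lastelt)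

-- heapq.heapify(x): for i in reversed(range(len(x)//2)): _siftup(x, i)
def heapifyA (x : List Int) : List Int :=
  (List.range (x.length / 2)).reverse.foldl (fun h i => siftupAux h i i (h.getD i 0)) x

-- the while-loop; fuel = current length is enough since each iteration shrinks the heap by one
def loopA : Nat → List Int → Int → Int → List Int × Int
  | 0, heap, _, answer => (heap, answer)
  | fuel + 1, heap, K, answer =>
    if heap.length > 1 then
      let p1 := heappopA heap
      if p1.1 ≥ K then (p1.2, answer)
      else
        let p2 := heappopA p1.2
        loopA fuel (heappushA p2.2 (p1.1 + p2.1 * 2)) K (answer + 1)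
    else (heap, answer)

def solution (scovilles : List Int) (K : Int) : Int :=
  let h := heapifyA scovilles
  let r := loopA h.length h K 0
  match PySem.List.pyGet? r.1 0 with   -- scovilles[0]; none = IndexError, excluded by Pre_
  | some v => if v ≥ K then r.2 else -1
  | none => -1

-- ===== PORT B =====
-- _insort's binary-search loop: returns the insertion index
def insortIdx (s : List Int) (x : Int) (lo hi : Nat) : Nat :=
  if _h : lo < hi then
    let mid := (lo + hi) / 2
    if s.getD mid 0 < x then insortIdx s x (mid + 1) hi else insortIdx s x lo mid
  else lo
termination_by hi - lo
decreasing_by all_goals omega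

-- _insort(s, x): s.insert(lo, x) at the found index
def insortB (s : List Int) (x : Int) : List Int :=
  PySem.List.insert s ((insortIdx s x 0 s.length : Nat) : Int) x

-- the while-loop of B; pop(0)/pop(0) become the two cons patterns (guarded by len > 1)
def loopB : Nat → List Int → Int → Int → List Int × Int
  | 0, s, _K, answer => (s, answer)
  | fuel + 1, s, K, answer =>
    if s.length > 1 then
      if s.getD 0 0 ≥ K then (s, answer)
      else
        match s with
        | first :: second :: s2 => loopB fuel (insortB s2 (first + second * 2)) K (answer + 1)
        | _ => (s, answer)   -- unreachable: length > 1
    else (s, answer)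

def solution_alt (scovilles : List Int) (K : Int) : Int :=
  let s := PySem.List.sorted scovilles (fun x => x) false
  let r := loopB s.length s K 0
  match PySem.List.pyGet? r.1 0 with   -- s[0]; none = IndexError, excluded by Pre_
  | some v => if v ≥ K then r.2 else -1
  | none => -1

-- ===== PRECONDITION & SPEC =====
-- On the empty list both A and B raise IndexError at the final s[0]; Pre_ excludes exactly that input.
def Pre_solution (scovilles : List Int) (K : Int) : Prop := scovilles ≠ []
instance (scovilles : List Int) (K : Int) : Decidable (Pre_solution scovilles K) := by unfold Pre_solution; infer_instance

def pvWitness_solution : List Int × Int := ([1, 2, 3, 9, 10, 12], 7)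

def Spec_solution (scovilles : List Int) (K : Int) (out : Int) : Prop := out = solution_alt scovilles K
instance (scovilles : List Int) (K : Int) (out : Int) : Decidable (Spec_solution scovilles K out) := by unfold Spec_solution; infer_instance

-- ===== CLAIM (what is proved, stated in full; the proofs are below) =====
def Claim_equal_solution : Prop := ∀ (scovilles : List Int) (K : Int), Dom_solution scovilles K → Pre_solution scovilles K → Spec_solution scovilles K (solution scovilles K)

-- ===== LEMMAS AND PROOFS =====

-- heap property for all edges whose parent index is ≥ s ((c-1)/2 is the parent of c)
def HeapFrom (l : List Int) (s : Nat) : Prop :=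
  ∀ c : Nat, 0 < c → c < l.length → s ≤ (c - 1) / 2 → l.getD ((c - 1) / 2) 0 ≤ l.getD c 0

-- c lies in the subtree rooted at s
def descB (s c : Nat) : Bool :=
  if c ≤ s then c == s else descB s ((c - 1) / 2)
termination_by c
decreasing_by omega

lemma descB_self (s : Nat) : descB s s = true := by
  unfold descB; simp

lemma descB_ge {s c : Nat} (h : descB s c = true) : s ≤ c := by
  unfold descB at h
  split at h
  · simp at h; omega
  · omega

lemma descB_parent {s c : Nat} (h : descB s c = true) (hne : c ≠ s) :
    descB s ((c - 1) / 2) = true ∧ s ≤ (c - 1) / 2 := by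
  unfold descB at h
  split at h
  · simp at h; omega
  · exact ⟨h, descB_ge h⟩

lemma descB_child {s p c : Nat} (h : descB s p = true) (hc : (c - 1) / 2 = p) (hgt : s < c) :
    descB s c = true := by
  unfold descB
  split
  · omega
  · rw [hc]; exact h

lemma descB_zero (c : Nat) : descB 0 c = true := by
  induction c using Nat.strong_induction_on with
  | _ c ih =>
    unfold descB
    split
    · simp; omega
    · exact ih _ (by omega)

lemma getD_set_self {l : List Int} {i : Nat} (h : i < l.length) (a : Int) :
    (l.set i a).getD i 0 = a := by
  simp [List.getD_eq_getElem?_getD, h]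

lemma getD_set_ne {l : List Int} {i j : Nat} (h : j ≠ i) (a : Int) :
    (l.set i a).getD j 0 = l.getD j 0 := by
  simp [List.getD_eq_getElem?_getD, List.getElem?_set_ne (by omega : i ≠ j)]

lemma count_set (l : List Int) (i : Nat) (a y : Int) (h : i < l.length) :
    (l.set i a).count y + (if l[i] = y then 1 else 0) = l.count y + (if a = y then 1 else 0) := by
  have hdec : l = l.take i ++ l[i] :: l.drop (i+1) := by
    rw [← List.set_eq_take_cons_drop l[i] h, List.set_getElem_self]
  rw [List.set_eq_take_cons_drop a h]
  conv_rhs => rw [hdec]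
  simp only [List.count_append, List.count_cons, beq_iff_eq]
  split_ifs <;> omega

-- the set-swap permutation used for every sift step
lemma swap_set_perm (l : List Int) (i j : Nat) (x : Int)
    (hi : i < l.length) (hj : j < l.length) (hne : i ≠ j) :
    ((l.set i (l.getD j 0)).set j x).Perm (l.set i x) := by
  rw [List.perm_iff_count]
  intro y
  have hj' : j < (l.set i (l.getD j 0)).length := by simpa using hj
  have h1 := count_set (l.set i (l.getD j 0)) j x y hj'
  have h2 := count_set l i (l.getD j 0) y hi
  have h3 := count_set l i x y hi
  have hg : l.getD j 0 = l[j] := by simp [List.getD_eq_getElem?_getD, List.getElem?_eq_getElem hj]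
  have hv : (l.set i (l.getD j 0))[j]'hj' = l.getD j 0 := by
    rw [List.getElem_set_ne hne _]; exact hg.symm
  rw [hv] at h1
  split_ifs at h1 h2 h3 <;> omega

lemma siftdownAux_spec (pos : Nat) (l : List Int) (s : Nat) (x : Int)
    (hsp : s ≤ pos) (hlen : pos < l.length) (hd : descB s pos = true)
    (ha : ∀ c : Nat, 0 < c → c < l.length → s ≤ (c - 1) / 2 → c ≠ pos →
      l.getD ((c - 1) / 2) 0 ≤ l.getD c 0)
    (hb : ∀ c : Nat, 0 < c → c < l.length → (c - 1) / 2 = pos → x ≤ l.getD c 0)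
    (hg : s < pos → ∀ c : Nat, 0 < c → c < l.length → (c - 1) / 2 = pos →
      l.getD ((pos - 1) / 2) 0 ≤ l.getD c 0) :
    (siftdownAux l s pos x).Perm (l.set pos x) ∧ HeapFrom (siftdownAux l s pos x) s ∧
      (siftdownAux l s pos x).length = l.length := by
  fun_induction siftdownAux l s pos x with
  | case1 heap pos hpos ppos parent hx ih =>
    have hpd : ppos = (pos - 1) / 2 := rfl
    have hprd : parent = heap.getD ppos 0 := rfl
    have hne : pos ≠ s := by omega
    obtain ⟨hdp, hspp⟩ := descB_parent hd hne
    have hplt : ppos < pos := by rw [hpd]; omega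
    have hlen' : ppos < (heap.set pos parent).length := by simp; omega
    have ha' : ∀ c : Nat, 0 < c → c < (heap.set pos parent).length → s ≤ (c - 1) / 2 → c ≠ ppos →
        (heap.set pos parent).getD ((c - 1) / 2) 0 ≤ (heap.set pos parent).getD c 0 := by
      intro c hc0 hcl hsc hcp
      have hcl' : c < heap.length := by simpa using hcl
      by_cases hcpos : c = pos
      · subst hcpos
        have h1 : (heap.set c parent).getD ((c - 1) / 2) 0 = parent := by
          rw [← hpd, getD_set_ne (by omega), ← hprd]
        have h2 : (heap.set c parent).getD c 0 = parent := getD_set_self hcl' _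
        rw [h1, h2]
      · by_cases hpc : (c - 1) / 2 = pos
        · have h1 : (heap.set pos parent).getD ((c - 1) / 2) 0 = parent := by
            rw [hpc, getD_set_self hlen _]
          rw [h1, getD_set_ne hcpos]
          have := hg hpos c hc0 hcl' hpc
          rw [← hpd, ← hprd] at this
          exact this
        · rw [getD_set_ne hcpos, getD_set_ne hpc]
          exact ha c hc0 hcl' hsc hcpos
    have hb' : ∀ c : Nat, 0 < c → c < (heap.set pos parent).length → (c - 1) / 2 = ppos →
        x ≤ (heap.set pos parent).getD c 0 := by
      intro c hc0 hcl hcp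
      have hcl' : c < heap.length := by simpa using hcl
      by_cases hcpos : c = pos
      · subst hcpos
        rw [getD_set_self hcl' _]
        exact le_of_lt hx
      · rw [getD_set_ne hcpos]
        have h2 : heap.getD ppos 0 ≤ heap.getD c 0 := by
          have := ha c hc0 hcl' (by rw [hcp]; exact hspp) hcpos
          rw [hcp] at this
          exact this
        calc x ≤ parent := le_of_lt hx
          _ ≤ heap.getD c 0 := by rw [hprd]; exact h2
    have hg' : s < ppos → ∀ c : Nat, 0 < c → c < (heap.set pos parent).length → (c - 1) / 2 = ppos →
        (heap.set pos parent).getD ((ppos - 1) / 2) 0 ≤ (heap.set pos parent).getD c 0 := by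
      intro hslt c hc0 hcl hcp
      have hcl' : c < heap.length := by simpa using hcl
      have hps : ppos ≠ s := by omega
      obtain ⟨_, hsppp⟩ := descB_parent hdp hps
      have hppe : heap.getD ((ppos - 1) / 2) 0 ≤ heap.getD ppos 0 :=
        ha ppos (by omega) (by omega) hsppp (by omega)
      have hq : (heap.set pos parent).getD ((ppos - 1) / 2) 0 = heap.getD ((ppos - 1) / 2) 0 :=
        getD_set_ne (by omega) _
      rw [hq]
      by_cases hcpos : c = pos
      · subst hcpos
        rw [getD_set_self hcl' _, hprd]
        exact hppe
      · rw [getD_set_ne hcpos]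
        have h2 : heap.getD ppos 0 ≤ heap.getD c 0 := by
          have := ha c hc0 hcl' (by rw [hcp]; omega) hcpos
          rw [hcp] at this
          exact this
        exact le_trans hppe h2
    obtain ⟨ihp, ihh, ihl⟩ := ih hspp hlen' hdp ha' hb' hg'
    refine ⟨?_, ihh, by simpa using ihl⟩
    exact ihp.trans (swap_set_perm heap pos ppos x hlen (by omega) (by omega))
  | case2 heap pos hpos ppos parent hx =>
    have hpd : ppos = (pos - 1) / 2 := rfl
    have hprd : parent = heap.getD ppos 0 := rfl
    have hplt : ppos < pos := by rw [hpd]; omega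
    refine ⟨List.Perm.refl _, ?_, by simp⟩
    intro c hc0 hcl hsc
    have hcl' : c < heap.length := by simpa using hcl
    by_cases hcpos : c = pos
    · subst hcpos
      rw [getD_set_self hcl' _, getD_set_ne (by omega : (c - 1) / 2 ≠ c)]
      rw [← hpd, ← hprd]
      omega
    · by_cases hpc : (c - 1) / 2 = pos
      · rw [hpc, getD_set_self hlen _, getD_set_ne hcpos]
        exact hb c hc0 hcl' hpc
      · rw [getD_set_ne hcpos, getD_set_ne hpc]
        exact ha c hc0 hcl' hsc hcpos
  | case3 heap pos hpos =>
    have hps : pos = s := by omega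
    refine ⟨List.Perm.refl _, ?_, by simp⟩
    intro c hc0 hcl hsc
    have hcl' : c < heap.length := by simpa using hcl
    by_cases hcpos : c = pos
    · subst hcpos
      omega
    · by_cases hpc : (c - 1) / 2 = pos
      · rw [hpc, getD_set_self hlen _, getD_set_ne hcpos]
        exact hb c hc0 hcl' hpc
      · rw [getD_set_ne hcpos, getD_set_ne hpc]
        exact ha c hc0 hcl' hsc hcpos

lemma siftupAux_spec (pos : Nat) (l : List Int) (s : Nat) (x : Int)
    (hsp : s ≤ pos) (hlen : pos < l.length) (hd : descB s pos = true)
    (ha : ∀ c : Nat, 0 < c → c < l.length → s ≤ (c - 1) / 2 → c ≠ pos → (c - 1) / 2 ≠ pos →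
      l.getD ((c - 1) / 2) 0 ≤ l.getD c 0)
    (hbb : s < pos → ∀ c : Nat, 0 < c → c < l.length → (c - 1) / 2 = pos →
      l.getD ((pos - 1) / 2) 0 ≤ l.getD c 0) :
    (siftupAux l s pos x).Perm (l.set pos x) ∧ HeapFrom (siftupAux l s pos x) s ∧
      (siftupAux l s pos x).length = l.length := by
  fun_induction siftupAux l s pos x with
  | case1 heap pos endp cp0 hlt cs ih =>
    have hcp0 : cp0 = 2 * pos + 1 := rfl
    have hlt' : cp0 < heap.length := hlt
    have hkey : 2 * pos + 1 ≤ cs ∧ cs < heap.length ∧ (cs - 1) / 2 = pos ∧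
        (∀ c : Nat, 0 < c → c < heap.length → (c - 1) / 2 = pos →
          heap.getD cs 0 ≤ heap.getD c 0) := by
      have hcsdef : cs = if cp0 + 1 < endp ∧ ¬ heap.getD cp0 0 < heap.getD (cp0 + 1) 0
          then cp0 + 1 else cp0 := rfl
      split at hcsdef
      case isTrue hcond =>
        have hc1 : cp0 + 1 < heap.length := hcond.1
        refine ⟨by omega, by omega, by omega, ?_⟩
        intro c hc0 hcl hpc
        have hcc : c = cp0 ∨ c = cp0 + 1 := by omega
        rw [hcsdef]
        rcases hcc with h | h <;> subst h
        · exact le_of_not_gt hcond.2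
        · exact le_refl _
      case isFalse hcond =>
        refine ⟨by omega, by omega, by omega, ?_⟩
        intro c hc0 hcl hpc
        have hcc : c = cp0 ∨ c = cp0 + 1 := by omega
        rw [hcsdef]
        rcases hcc with h | h <;> subst h
        · exact le_refl _
        · have hc1 : cp0 + 1 < endp := hcl
          have hx2 : heap.getD cp0 0 < heap.getD (cp0 + 1) 0 := by
            by_contra hn
            exact hcond ⟨hc1, hn⟩
          exact le_of_lt hx2
    obtain ⟨hcsge, hcsl, hcschild, hmin⟩ := hkey
    have hd' : descB s cs = true := descB_child hd hcschild (by omega)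
    have ha' : ∀ c : Nat, 0 < c → c < (heap.set pos (heap.getD cs 0)).length → s ≤ (c - 1) / 2 →
        c ≠ cs → (c - 1) / 2 ≠ cs →
        (heap.set pos (heap.getD cs 0)).getD ((c - 1) / 2) 0 ≤
          (heap.set pos (heap.getD cs 0)).getD c 0 := by
      intro c hc0 hcl hsc hccs hpcs
      have hcl' : c < heap.length := by simpa using hcl
      by_cases hcpos : c = pos
      · subst hcpos
        rw [getD_set_ne (by omega : (c - 1) / 2 ≠ c), getD_set_self hlen]
        exact hbb (by omega) cs (by omega) hcsl hcschild
      · by_cases hpc : (c - 1) / 2 = pos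
        · rw [hpc, getD_set_self hlen, getD_set_ne hcpos]
          exact hmin c hc0 hcl' hpc
        · rw [getD_set_ne hcpos, getD_set_ne hpc]
          exact ha c hc0 hcl' hsc hcpos hpc
    have hbb' : s < cs → ∀ c : Nat, 0 < c → c < (heap.set pos (heap.getD cs 0)).length →
        (c - 1) / 2 = cs →
        (heap.set pos (heap.getD cs 0)).getD ((cs - 1) / 2) 0 ≤
          (heap.set pos (heap.getD cs 0)).getD c 0 := by
      intro _ c hc0 hcl hpc
      have hcl' : c < heap.length := by simpa using hcl
      have hcne : c ≠ pos := by omega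
      rw [hcschild, getD_set_self hlen, getD_set_ne hcne]
      have := ha c hc0 hcl' (by omega) hcne (by omega)
      rw [hpc] at this
      exact this
    obtain ⟨ihp, ihh, ihl⟩ := ih (by omega) (by simpa using hcsl) hd' ha' hbb'
    exact ⟨ihp.trans (swap_set_perm heap pos cs x hlen hcsl (by omega)), ihh, by simpa using ihl⟩
  | case2 heap pos endp cp0 hnlt =>
    have h2 : ¬ (2 * pos + 1 < heap.length) := hnlt
    have hlen' : pos < (heap.set pos x).length := by simpa using hlen
    have hchild_none : ∀ c : Nat, 0 < c → c < (heap.set pos x).length → (c - 1) / 2 ≠ pos := by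
      intro c hc0 hcl
      have : c < heap.length := by simpa using hcl
      omega
    have ha'' : ∀ c : Nat, 0 < c → c < (heap.set pos x).length → s ≤ (c - 1) / 2 → c ≠ pos →
        (heap.set pos x).getD ((c - 1) / 2) 0 ≤ (heap.set pos x).getD c 0 := by
      intro c hc0 hcl hsc hcpos
      have hcl' : c < heap.length := by simpa using hcl
      have hpc : (c - 1) / 2 ≠ pos := hchild_none c hc0 hcl
      rw [getD_set_ne hcpos, getD_set_ne hpc]
      exact ha c hc0 hcl' hsc hcpos hpc
    obtain ⟨p, hh, hle⟩ := siftdownAux_spec pos (heap.set pos x) s x hsp hlen' hd ha''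
      (fun c hc0 hcl hpc => absurd hpc (hchild_none c hc0 hcl))
      (fun _ c hc0 hcl hpc => absurd hpc (hchild_none c hc0 hcl))
    rw [List.set_set] at p
    exact ⟨p, hh, by simpa using hle⟩

lemma getD_dropLast (l : List Int) (i : Nat) (h : i < l.length - 1) :
    l.dropLast.getD i 0 = l.getD i 0 := by
  rw [List.getD_eq_getElem?_getD, List.getD_eq_getElem?_getD, List.getElem?_dropLast]
  simp [h]

lemma getD_append_left (l : List Int) (x : Int) (i : Nat) (h : i < l.length) :
    (l ++ [x]).getD i 0 = l.getD i 0 := by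
  simp [List.getD_eq_getElem?_getD, List.getElem?_append_left h]

lemma heapify_fold (k : Nat) : ∀ l : List Int, k ≤ l.length / 2 → HeapFrom l k →
    ((List.range k).reverse.foldl (fun h i => siftupAux h i i (h.getD i 0)) l).Perm l ∧
    HeapFrom ((List.range k).reverse.foldl (fun h i => siftupAux h i i (h.getD i 0)) l) 0 ∧
    ((List.range k).reverse.foldl (fun h i => siftupAux h i i (h.getD i 0)) l).length = l.length := by
  induction k with
  | zero => intro l _ hh; exact ⟨by simp, by simpa using hh, by simp⟩
  | succ k ih =>
    intro l hk hh
    rw [List.range_succ, List.reverse_append]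
    simp only [List.reverse_cons, List.reverse_nil, List.nil_append, List.singleton_append,
      List.foldl_cons]
    have hkl : k < l.length := by omega
    obtain ⟨hp, hhf, hlen⟩ := siftupAux_spec k l k (l.getD k 0) (le_refl k) hkl (descB_self k)
      (fun c hc0 hcl hsc hcne hpne => hh c hc0 hcl (by omega))
      (fun hkk => absurd hkk (lt_irrefl k))
    have hset : l.set k (l.getD k 0) = l := by
      have hgd : l.getD k 0 = l[k] := by
        simp [List.getD_eq_getElem?_getD, List.getElem?_eq_getElem hkl]
      rw [hgd]; exact List.set_getElem_self hkl
    rw [hset] at hp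
    obtain ⟨p2, h2, l2⟩ := ih (siftupAux l k k (l.getD k 0)) (by omega) hhf
    exact ⟨p2.trans hp, h2, by omega⟩

lemma root_min_getD {l : List Int} (hh : HeapFrom l 0) :
    ∀ j : Nat, j < l.length → l.getD 0 0 ≤ l.getD j 0 := by
  intro j
  induction j using Nat.strong_induction_on with
  | _ j ihj =>
    intro hj
    rcases Nat.eq_zero_or_pos j with h0 | h0
    · subst h0; exact le_refl _
    · exact le_trans (ihj ((j - 1) / 2) (by omega) (by omega)) (hh j h0 hj (Nat.zero_le _))

lemma root_min_mem {l : List Int} (hh : HeapFrom l 0) : ∀ x ∈ l, l.getD 0 0 ≤ x := by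
  intro x hx
  obtain ⟨j, hj, rfl⟩ := List.mem_iff_getElem.mp hx
  have : l.getD j 0 = l[j] := by simp [List.getD_eq_getElem?_getD, List.getElem?_eq_getElem hj]
  rw [← this]
  exact root_min_getD hh j hj

lemma set_zero_dropLast_perm_tail (l : List Int) (h : 2 ≤ l.length) :
    ((l.dropLast).set 0 (l.getD (l.length - 1) 0)).Perm l.tail := by
  obtain ⟨a, t, rfl⟩ : ∃ a t, l = a :: t := by
    cases l with
    | nil => simp at h
    | cons a t => exact ⟨a, t, rfl⟩
  have ht : t ≠ [] := by intro hnil; subst hnil; simp at h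
  have hz : (a :: t).getD ((a :: t).length - 1) 0 = t.getLast ht := by
    have hlt : (a :: t).length - 1 < (a :: t).length := by simp
    rw [List.getD_eq_getElem?_getD, List.getElem?_eq_getElem hlt]
    simp only [Option.getD_some]
    rw [← List.getLast_eq_getElem (by simp : a :: t ≠ []), List.getLast_cons ht]
  have hdl : (a :: t).dropLast = a :: t.dropLast := by
    cases t with
    | nil => exact absurd rfl ht
    | cons b t' => rfl
  rw [hz, hdl]
  have hset : (a :: t.dropLast).set 0 (t.getLast ht) = t.getLast ht :: t.dropLast := rfl
  rw [hset, List.tail_cons]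
  have : t.dropLast ++ [t.getLast ht] = t := List.dropLast_append_getLast ht
  calc (t.getLast ht :: t.dropLast).Perm (t.dropLast ++ [t.getLast ht]) :=
        (List.perm_append_singleton _ _).symm
    _ = t := this

lemma heappopA_spec {l : List Int} (hh : HeapFrom l 0) (hne : l ≠ []) :
    (heappopA l).1 = l.getD 0 0 ∧ (heappopA l).2.Perm l.tail ∧ HeapFrom (heappopA l).2 0 ∧
      (heappopA l).2.length = l.length - 1 := by
  unfold heappopA
  simp only []
  split
  case isTrue hempty =>
    obtain ⟨a, rfl⟩ : ∃ a, l = [a] := by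
      cases l with
      | nil => exact absurd rfl hne
      | cons a t =>
        cases t with
        | nil => exact ⟨a, rfl⟩
        | cons b t' => simp at hempty
    refine ⟨rfl, by simp, ?_, by simp⟩
    intro c hc0 hcl _
    simp at hcl
  case isFalse hempty =>
    have hdlne : l.dropLast ≠ [] := by simpa [List.isEmpty_iff] using hempty
    have hlen2 : 2 ≤ l.length := by
      have h1 : l.dropLast.length ≠ 0 := fun h => hdlne (List.length_eq_zero_iff.mp h)
      simp at h1
      omega
    have hlenh0 : (l.dropLast.set 0 (l.getD (l.length - 1) 0)).length = l.length - 1 := by simp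
    obtain ⟨p, hf, hl⟩ := siftupAux_spec 0 (l.dropLast.set 0 (l.getD (l.length - 1) 0)) 0
      (l.getD (l.length - 1) 0) (le_refl 0) (by omega) (descB_self 0)
      (fun c hc0 hcl _ hcne hpne => by
        have hcl' : c < l.length - 1 := by omega
        rw [getD_set_ne hcne, getD_set_ne hpne, getD_dropLast _ _ hcl',
          getD_dropLast _ _ (by omega)]
        exact hh c hc0 (by omega) (Nat.zero_le _))
      (fun h0 => absurd h0 (lt_irrefl 0))
    rw [List.set_set] at p
    refine ⟨?_, ?_, hf, ?_⟩
    · show l.dropLast.getD 0 0 = l.getD 0 0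
      exact getD_dropLast _ _ (by omega)
    · exact p.trans (set_zero_dropLast_perm_tail l hlen2)
    · rw [hl, hlenh0]

lemma heappushA_spec {l : List Int} (hh : HeapFrom l 0) (x : Int) :
    (heappushA l x).Perm (x :: l) ∧ HeapFrom (heappushA l x) 0 := by
  unfold heappushA
  have hlen : l.length < (l ++ [x]).length := by simp
  obtain ⟨p, hf, hl⟩ := siftdownAux_spec l.length (l ++ [x]) 0 x (Nat.zero_le _) hlen
    (descB_zero _)
    (fun c hc0 hcl _ hcne => by
      have hcl' : c < l.length := by simp at hcl; omega
      have hpl : (c - 1) / 2 < l.length := by omega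
      rw [getD_append_left _ _ _ hcl', getD_append_left _ _ _ hpl]
      exact hh c hc0 hcl' (Nat.zero_le _))
    (fun c hc0 hcl hpc => by simp at hcl; omega)
    (fun _ c hc0 hcl hpc => by simp at hcl; omega)
  have hset : (l ++ [x]).set l.length x = l ++ [x] := by simp
  rw [hset] at p
  exact ⟨p.trans (List.perm_append_singleton x l), hf⟩

lemma heapifyA_spec (l : List Int) :
    (heapifyA l).Perm l ∧ HeapFrom (heapifyA l) 0 ∧ (heapifyA l).length = l.length := by
  unfold heapifyA
  exact heapify_fold (l.length / 2) l (le_refl _)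
    (fun c hc0 hcl hsc => absurd hsc (by omega))

lemma getD_eq_getElem' (s : List Int) (j : Nat) (h : j < s.length) : s.getD j 0 = s[j] := by
  simp [List.getD_eq_getElem?_getD, List.getElem?_eq_getElem h]

lemma pairwise_getD_mono {s : List Int} (hs : s.Pairwise (· ≤ ·)) {i j : Nat}
    (hij : i ≤ j) (hj : j < s.length) : s.getD i 0 ≤ s.getD j 0 := by
  rcases Nat.lt_or_ge i j with hlt | hge
  · rw [getD_eq_getElem' _ _ (by omega), getD_eq_getElem' _ _ hj]
    exact List.pairwise_iff_getElem.mp hs i j (by omega) hj hlt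
  · have : i = j := by omega
    subst this
    exact le_refl _

lemma insortIdx_spec (s : List Int) (x : Int) (lo hi : Nat) (hs : s.Pairwise (· ≤ ·))
    (hlohi : lo ≤ hi) (hhi : hi ≤ s.length)
    (hlow : ∀ j : Nat, j < lo → s.getD j 0 < x)
    (hhigh : ∀ j : Nat, hi ≤ j → j < s.length → x ≤ s.getD j 0) :
    insortIdx s x lo hi ≤ s.length ∧ (∀ j : Nat, j < insortIdx s x lo hi → s.getD j 0 < x) ∧
      (∀ j : Nat, insortIdx s x lo hi ≤ j → j < s.length → x ≤ s.getD j 0) := by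
  fun_induction insortIdx s x lo hi with
  | case1 lo hi hlt mid hcmp ih =>
    have hmid : mid = (lo + hi) / 2 := rfl
    refine ih (by omega) hhi ?_ hhigh
    intro j hj
    rcases Nat.lt_or_ge j mid with h | h
    · exact lt_of_le_of_lt (pairwise_getD_mono hs (by omega) (by omega)) hcmp
    · have : j = mid := by omega
      subst this
      exact hcmp
  | case2 lo hi hlt mid hcmp ih =>
    have hmid : mid = (lo + hi) / 2 := rfl
    refine ih (by omega) (by omega) hlow ?_
    intro j hj hjl
    exact le_trans (le_of_not_gt hcmp) (pairwise_getD_mono hs (by omega) hjl)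
  | case3 lo hi hlt =>
    exact ⟨by omega, hlow, fun j hj hjl => hhigh j (by omega) hjl⟩

lemma insortB_spec {s : List Int} (hs : s.Pairwise (· ≤ ·)) (x : Int) :
    (insortB s x).Perm (x :: s) ∧ (insortB s x).Pairwise (· ≤ ·) := by
  obtain ⟨hrle, hlow, hhigh⟩ := insortIdx_spec s x 0 s.length hs (Nat.zero_le _) (le_refl _)
    (fun j hj => absurd hj (Nat.not_lt_zero j)) (fun j hj hjl => absurd hjl (by omega))
  have hins : insortB s x = s.take (insortIdx s x 0 s.length) ++
      x :: s.drop (insortIdx s x 0 s.length) := by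
    unfold insortB
    exact PySem.List.insert_natCast s _ x hrle
  set r := insortIdx s x 0 s.length with hr
  constructor
  · rw [hins]
    calc (s.take r ++ x :: s.drop r).Perm (x :: (s.take r ++ s.drop r)) := List.perm_middle
      _ = x :: s := by rw [List.take_append_drop]
  · rw [hins]
    rw [List.pairwise_append]
    refine ⟨hs.sublist (List.take_sublist r s), ?_, ?_⟩
    · rw [List.pairwise_cons]
      refine ⟨?_, hs.sublist (List.drop_sublist r s)⟩
      intro b hb
      obtain ⟨k, hk, rfl⟩ := List.mem_iff_getElem.mp hb
      rw [List.getElem_drop]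
      rw [← getD_eq_getElem' _ _ (by simp at hk ⊢; omega)]
      exact hhigh (r + k) (by omega) (by simp at hk; omega)
    · intro a ha b hb
      obtain ⟨j, hj, rfl⟩ := List.mem_iff_getElem.mp ha
      have hjr : j < r := by simp at hj; omega
      have hjs : j < s.length := by omega
      rw [List.getElem_take]
      have hax : s[j] < x := by
        rw [← getD_eq_getElem' _ _ hjs]
        exact hlow j hjr
      rcases List.mem_cons.mp hb with rfl | hb2
      · exact le_of_lt hax
      · obtain ⟨k, hk, rfl⟩ := List.mem_iff_getElem.mp hb2
        rw [List.getElem_drop]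
        have : x ≤ s[r + k]'(by simp at hk; omega) := by
          rw [← getD_eq_getElem' _ _ (by simp at hk; omega)]
          exact hhigh (r + k) (by omega) (by simp at hk; omega)
        exact le_trans (le_of_lt hax) this

lemma getD_zero_mem {l : List Int} (h : l ≠ []) : l.getD 0 0 ∈ l := by
  cases l with
  | nil => exact absurd rfl h
  | cons a t => simp [List.getD]

-- heads of a heap and of a sorted list with the same multiset agree (both are the minimum)
lemma head_eq {h s : List Int} (hh : HeapFrom h 0) (hs : s.Pairwise (· ≤ ·)) (hp : h.Perm s) :
    h.getD 0 0 = s.getD 0 0 := by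
  cases s with
  | nil =>
    have : h = [] := List.Perm.eq_nil hp
    rw [this]
  | cons b t =>
    have hhne : h ≠ [] := by
      intro hn
      subst hn
      exact absurd hp.symm (by simp)
    have h1 : h.getD 0 0 ≤ b := root_min_mem hh b (hp.mem_iff.mpr (List.mem_cons_self))
    have h2 : b ≤ h.getD 0 0 := by
      have hmem : h.getD 0 0 ∈ b :: t := hp.mem_iff.mp (getD_zero_mem hhne)
      rcases List.mem_cons.mp hmem with heq | hmem2
      · rw [heq]
      · exact List.rel_of_pairwise_cons hs hmem2
    have : (b :: t).getD 0 0 = b := rfl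
    rw [this]
    omega

def finishPV (r : List Int × Int) (K : Int) : Int :=
  match PySem.List.pyGet? r.1 0 with
  | some v => if v ≥ K then r.2 else -1
  | none => -1

lemma pyGet?_zero_eq {l : List Int} (h : l ≠ []) :
    PySem.List.pyGet? l 0 = some (l.getD 0 0) := by
  cases l with
  | nil => exact absurd rfl h
  | cons a t => rw [PySem.List.pyGet?_zero_cons]; rfl

lemma finish_eq {h s : List Int} (hh : HeapFrom h 0) (hs : s.Pairwise (· ≤ ·))
    (hp : h.Perm s) (K ans : Int) : finishPV (h, ans) K = finishPV (s, ans) K := by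
  unfold finishPV
  by_cases hne : h = []
  · subst hne
    rw [List.Perm.eq_nil hp.symm]
  · have hsne : s ≠ [] := by
      intro hn
      subst hn
      exact hne (List.Perm.eq_nil hp)
    simp only [pyGet?_zero_eq hne, pyGet?_zero_eq hsne, head_eq hh hs hp]

lemma loop_eq : ∀ (fuel : Nat) (h s : List Int) (K ans : Int),
    HeapFrom h 0 → s.Pairwise (· ≤ ·) → h.Perm s →
    finishPV (loopA fuel h K ans) K = finishPV (loopB fuel s K ans) K := by
  intro fuel
  induction fuel with
  | zero =>
    intro h s K ans hh hs hp
    exact finish_eq hh hs hp K ans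
  | succ fuel ih =>
    intro h s K ans hh hs hp
    have hlen := hp.length_eq
    by_cases hgt : h.length > 1
    case neg =>
      have hsgt : ¬ s.length > 1 := by omega
      simp only [loopA, loopB, if_neg hgt, if_neg hsgt]
      exact finish_eq hh hs hp K ans
    case pos =>
      have hsgt : s.length > 1 := by omega
      obtain ⟨first, second, s2, rfl⟩ : ∃ a b t, s = a :: b :: t := by
        cases s with
        | nil => simp at hsgt
        | cons a t =>
          cases t with
          | nil => simp at hsgt
          | cons b t' => exact ⟨a, b, t', rfl⟩
      have hne : h ≠ [] := by intro hn; subst hn; simp at hgt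
      obtain ⟨e1, e2, e3, e4⟩ := heappopA_spec hh hne
      have hfirst : h.getD 0 0 = first := head_eq hh hs hp
      simp only [loopA, loopB, if_pos hgt, if_pos hsgt]
      rw [e1, hfirst]
      have hsheadD : (first :: second :: s2).getD 0 0 = first := rfl
      rw [hsheadD]
      by_cases hK : first ≥ K
      case pos =>
        rw [if_pos hK, if_pos hK]
        -- A popped the root before breaking; its new root is still ≥ K
        have hp2ne : (heappopA h).2 ≠ [] := by
          intro hn
          rw [hn] at e4
          simp at e4
          omega
        unfold finishPV
        rw [pyGet?_zero_eq hp2ne, pyGet?_zero_eq (by simp : first :: second :: s2 ≠ [])]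
        have hvK : (heappopA h).2.getD 0 0 ≥ K := by
          have hmem : (heappopA h).2.getD 0 0 ∈ h :=
            List.mem_of_mem_tail (e2.mem_iff.mp (getD_zero_mem hp2ne))
          have := root_min_mem hh _ hmem
          rw [hfirst] at this
          omega
        show (if (heappopA h).2.getD 0 0 ≥ K then ans else -1) =
          (if (first :: second :: s2).getD 0 0 ≥ K then ans else -1)
        rw [if_pos hvK, if_pos (by exact hK : (first :: second :: s2).getD 0 0 ≥ K)]
      case neg =>
        rw [if_neg hK, if_neg hK]
        -- relate the two new states and recurse
        have hhtail : h.tail.Perm (second :: s2) := by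
          obtain ⟨h0, ht, rfl⟩ : ∃ a t, h = a :: t := by
            cases h with
            | nil => exact absurd rfl hne
            | cons a t => exact ⟨a, t, rfl⟩
          have hh0 : h0 = first := hfirst
          rw [hh0] at hp
          exact hp.cons_inv
        have hp12 : (heappopA h).2.Perm (second :: s2) := e2.trans hhtail
        have hp12ne : (heappopA h).2 ≠ [] := by
          intro hn
          rw [hn] at hp12
          exact absurd hp12.symm (by simp)
        obtain ⟨f1, f2, f3, f4⟩ := heappopA_spec e3 hp12ne
        have hs2 : (second :: s2).Pairwise (· ≤ ·) := (List.pairwise_cons.mp hs).2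
        have hsecond : (heappopA h).2.getD 0 0 = second := head_eq e3 hs2 hp12
        rw [f1, hsecond]
        have hp22 : (heappopA (heappopA h).2).2.Perm s2 := by
          obtain ⟨q, qt, hq⟩ : ∃ a t, (heappopA h).2 = a :: t := by
            cases hcase : (heappopA h).2 with
            | nil => exact absurd hcase hp12ne
            | cons a t => exact ⟨a, t, rfl⟩
          have hqs : q = second := by rw [hq] at hsecond; exact hsecond
          have htl : (heappopA h).2.tail.Perm s2 := by
            rw [hq, hqs] at hp12
            rw [hq]
            exact hp12.cons_inv
          exact f2.trans htl
        obtain ⟨g1, g2⟩ := heappushA_spec f3 (first + second * 2)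
        obtain ⟨b1, b2⟩ := insortB_spec (List.pairwise_cons.mp hs2).2 (first + second * 2)
        have hfin : (heappushA (heappopA (heappopA h).2).2 (first + second * 2)).Perm
            (insortB s2 (first + second * 2)) :=
          g1.trans ((hp22.cons _).trans b1.symm)
        exact ih _ _ K (ans + 1) g2 b2 hfin

-- ===== VERDICT (by name: the statement is the Claim_ definition above) =====
theorem solution_spec : Claim_equal_solution := by
  intro scovilles K _ _
  unfold Spec_solution solution solution_alt
  obtain ⟨hpA, hhA, hlA⟩ := heapifyA_spec scovilles
  have hsp : (PySem.List.sorted scovilles (fun x => x) false).Perm scovilles :=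
    PySem.List.sorted_perm scovilles (fun x => x) false
  have hpw : (PySem.List.sorted scovilles (fun x => x) false).Pairwise (· ≤ ·) := by
    simpa using PySem.List.sorted_pairwise (xs := scovilles) (key := fun x => x)
  have hperm : (heapifyA scovilles).Perm (PySem.List.sorted scovilles (fun x => x) false) :=
    hpA.trans hsp.symm
  have hlen : (heapifyA scovilles).length =
      (PySem.List.sorted scovilles (fun x => x) false).length := hperm.length_eq
  show finishPV (loopA (heapifyA scovilles).length (heapifyA scovilles) K 0) K =
    finishPV (loopB (PySem.List.sorted scovilles (fun x => x) false).length
      (PySem.List.sorted scovilles (fun x => x) false) K 0) K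
  rw [hlen]
  exact loop_eq _ _ _ K 0 hhA hpw hperm
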